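-- pv_equiv track=rewrite | github.com/adosib/PyLearn | Zero_to_Hero/function_practice.py | summer_69_v2
-- ===== SOURCE A (Python) =====
-- def summer_69_v2(arr):
--     total = 0
--     add = True
--     for num in arr:
--         if num != 6 and add:
--             total += num
--         elif num == 6 and add:
--             add = False
--         elif num != 9 and not add:
--             continue
--         else:
--             add = True
--             continue
--     return total
-- ===== SOURCE B (Python) =====
-- def summer_69_v2(arr):
--     total = 0
--     i = 0
--     n = len(arr)
--     while i < n:
--         if arr[i] == 6:
--             i += 1
--             while i < n and arr[i] != 9:
--                 i += 1
--             i += 1  # consume the 9 (or run off the end)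
--         else:
--             total += arr[i]
--             i += 1
--     return total
-- ===== Notes on version B (the rewrite author's own statement) =====
-- stated objective: alternative
-- what changed: Replaces A's boolean add-flag with its four-branch elif chain by an explicit index walk whose inner while-loop skips a 6..9 segment in one go.
import Mathlib
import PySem

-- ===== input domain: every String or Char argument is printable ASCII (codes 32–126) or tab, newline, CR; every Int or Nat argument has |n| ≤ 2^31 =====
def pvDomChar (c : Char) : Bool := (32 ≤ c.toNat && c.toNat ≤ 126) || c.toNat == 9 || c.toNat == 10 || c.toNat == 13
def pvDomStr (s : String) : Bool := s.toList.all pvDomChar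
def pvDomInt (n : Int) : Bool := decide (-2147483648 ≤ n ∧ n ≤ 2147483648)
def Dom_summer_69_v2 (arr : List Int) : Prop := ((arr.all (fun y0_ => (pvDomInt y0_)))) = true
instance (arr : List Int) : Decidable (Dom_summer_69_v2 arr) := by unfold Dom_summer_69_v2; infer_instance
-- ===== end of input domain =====

-- B replaces A's boolean add-flag and elif chain by an index walk with an inner skip loop; alternative decomposition, same cost.
-- ===== PORT A =====
def summer_69_v2 (arr : List Int) : Int :=
  (arr.foldl (fun (st : Int × Bool) num =>
      if num ≠ 6 ∧ st.2 then (st.1 + num, st.2)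
      else if num = 6 ∧ st.2 then (st.1, false)
      else if num ≠ 9 ∧ ¬ st.2 then st
      else (st.1, true)) (0, true)).1

-- ===== PORT B =====
-- inner `while i < n and arr[i] != 9: i += 1` followed by `i += 1`:
-- returns the tail after the first 9 (empty if none).
def pvSkip9 : List Int → List Int
  | [] => []
  | y :: ys => if y = 9 then ys else pvSkip9 ys

theorem pvSkip9_len_le (l : List Int) : (pvSkip9 l).length ≤ l.length := by
  induction l with
  | nil => simp [pvSkip9]
  | cons y ys ih =>
      simp only [pvSkip9]
      split <;> simp_all <;> omega

-- outer while over the index walk: recursion on the remaining suffix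
def summer_69_v2_alt : List Int → Int
  | [] => 0
  | x :: xs =>
      if x = 6 then summer_69_v2_alt (pvSkip9 xs)
      else x + summer_69_v2_alt xs
termination_by l => l.length
decreasing_by
  · have := pvSkip9_len_le xs; simp; omega
  · simp

-- ===== PRECONDITION & SPEC =====
def Spec_summer_69_v2 (arr : List Int) (out : Int) : Prop := out = summer_69_v2_alt arr
instance (arr : List Int) (out : Int) : Decidable (Spec_summer_69_v2 arr out) := by unfold Spec_summer_69_v2; infer_instance

-- ===== CLAIM (what is proved, stated in full; the proofs are below) =====
def Claim_equal_summer_69_v2 : Prop := ∀ (arr : List Int), Dom_summer_69_v2 arr → Spec_summer_69_v2 arr (summer_69_v2 arr)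

-- ===== LEMMAS AND PROOFS =====

-- ===== VERDICT (by name: the statement is the Claim_ definition above) =====
theorem pvFold_eq (l : List Int) : ∀ t : Int,
    (l.foldl (fun (st : Int × Bool) num =>
      if num ≠ 6 ∧ st.2 then (st.1 + num, st.2)
      else if num = 6 ∧ st.2 then (st.1, false)
      else if num ≠ 9 ∧ ¬ st.2 then st
      else (st.1, true)) (t, true)).1 = t + summer_69_v2_alt l
    ∧ (l.foldl (fun (st : Int × Bool) num =>
      if num ≠ 6 ∧ st.2 then (st.1 + num, st.2)
      else if num = 6 ∧ st.2 then (st.1, false)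
      else if num ≠ 9 ∧ ¬ st.2 then st
      else (st.1, true)) (t, false)).1 = t + summer_69_v2_alt (pvSkip9 l) := by
  induction l with
  | nil => intro t; simp [pvSkip9, summer_69_v2_alt]
  | cons x xs ih =>
      intro t
      constructor
      · by_cases h6 : x = 6
        · simp only [List.foldl_cons, h6]
          simpa [summer_69_v2_alt] using (ih t).2
        · simp only [List.foldl_cons, ]
          have := (ih (t + x)).1
          simp [summer_69_v2_alt, h6] at this ⊢
          rw [this]; ring
      · by_cases h9 : x = 9
        · simp only [List.foldl_cons, h9]
          have := (ih t).1
          simp [pvSkip9] at this ⊢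
          exact this
        · simp only [List.foldl_cons]
          have := (ih t).2
          simp [pvSkip9, h9] at this ⊢
          exact this

theorem summer_69_v2_spec : Claim_equal_summer_69_v2 := by
  intro arr _
  unfold Spec_summer_69_v2 summer_69_v2
  simpa using (pvFold_eq arr 0).1
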